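-- pv_equiv track=rewrite | github.com/pypi-data/pypi-mirror-403 | packages/fovus/fovus-2.0.44-py3-none-any.whl/fovus/util/aws_credentials_util.py | remove_profile_from_content
-- ===== SOURCE A (Python) =====
-- def remove_profile_from_content(content: str, profile_name: str) -> str:
--     """
--     Remove a specific profile section from AWS credentials content.
--
--     Returns the updated content with the profile removed.
--     """
--     lines = content.split("\n")
--     new_lines = []
--     skip_section = False
--
--     for line in lines:
--         stripped = line.strip()
--         # Check if we're entering the target profile section
--         if stripped == profile_name:
--             skip_section = True
--             continue
--         # Check if we're entering a different profile section
--         if stripped.startswith("[") and stripped.endswith("]"):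
--             skip_section = False
--
--         # Only add lines that are not part of the target profile section
--         if not skip_section:
--             new_lines.append(line)
--
--     # Clean up trailing empty lines
--     while new_lines and not new_lines[-1].strip():
--         new_lines.pop()
--
--     # Reconstruct content
--     updated_content = "\n".join(new_lines)
--     if updated_content and not updated_content.endswith("\n"):
--         updated_content += "\n"
--
--     return updated_content
-- ===== SOURCE B (Python) =====
-- def remove_profile_from_content(content: str, profile_name: str) -> str:
--     """Section-based removal: partition lines at boundaries, drop the target section."""
--     lines = content.split("\n")
--
--     def is_boundary(line):
--         s = line.strip()
--         return s == profile_name or (s.startswith("[") and s.endswith("]"))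
--
--     new_lines = []
--     i = 0
--     # preamble before the first boundary is always kept
--     while i < len(lines) and not is_boundary(lines[i]):
--         new_lines.append(lines[i])
--         i += 1
--     # each section: a boundary line plus the non-boundary lines after it
--     while i < len(lines):
--         keep = lines[i].strip() != profile_name
--         if keep:
--             new_lines.append(lines[i])
--         i += 1
--         while i < len(lines) and not is_boundary(lines[i]):
--             if keep:
--                 new_lines.append(lines[i])
--             i += 1
--     # drop trailing blank lines
--     rev = new_lines[::-1]
--     k = 0
--     while k < len(rev) and not rev[k].strip():
--         k += 1
--     new_lines = rev[k:][::-1]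
--     updated_content = "\n".join(new_lines)
--     if updated_content and not updated_content.endswith("\n"):
--         updated_content += "\n"
--     return updated_content
-- ===== Notes on version B (the rewrite author's own statement) =====
-- stated objective: alternative
-- what changed: Replaces A's per-line skip-flag state machine with a section-based decomposition: partition the lines at boundary lines (profile match or [..] header), keep the preamble and every section whose header is not the target profile; same trailing-blank cleanup and join.
import Mathlib
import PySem

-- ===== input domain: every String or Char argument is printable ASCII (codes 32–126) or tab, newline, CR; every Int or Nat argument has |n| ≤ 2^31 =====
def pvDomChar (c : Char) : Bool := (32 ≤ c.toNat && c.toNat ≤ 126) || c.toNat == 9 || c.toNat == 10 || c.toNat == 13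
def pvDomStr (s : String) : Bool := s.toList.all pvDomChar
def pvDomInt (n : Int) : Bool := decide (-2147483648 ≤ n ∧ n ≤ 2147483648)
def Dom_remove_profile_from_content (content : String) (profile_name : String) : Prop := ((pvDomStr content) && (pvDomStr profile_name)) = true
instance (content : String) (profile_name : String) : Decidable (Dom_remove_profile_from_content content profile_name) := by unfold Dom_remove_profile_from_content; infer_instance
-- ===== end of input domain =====

-- B replaces A's per-line skip-flag state machine by a section-based decomposition
-- (partition the lines at section boundaries, keep every section whose header is not
-- the target profile); objective: alternative (same cost, different structure).

-- ===== PORT A =====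
-- one iteration of A's for-loop: state = (new_lines, skip_section)
def pvStepA (profile_name : String) (st : List String × Bool) (line : String) : List String × Bool :=
  let stripped := PySem.Str.strip line
  if stripped == profile_name then (st.1, true)
  else
    let skip := if PySem.Str.startswith stripped "[" && PySem.Str.endswith stripped "]"
                then false else st.2
    if skip then (st.1, skip) else (st.1 ++ [line], skip)

def remove_profile_from_content (content : String) (profile_name : String) : String :=
  let lines := (PySem.Str.split? content "\n").getD []
  let new_lines := (lines.foldl (pvStepA profile_name) (([], false) : List String × Bool)).1
  -- while new_lines and not new_lines[-1].strip(): new_lines.pop()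
  let new_lines := (new_lines.reverse.dropWhile (fun l => PySem.Str.strip l == "")).reverse
  let updated := PySem.Str.join "\n" new_lines
  if updated != "" && !PySem.Str.endswith updated "\n" then updated ++ "\n" else updated

-- ===== PORT B =====
def pvIsBoundary (profile_name : String) (line : String) : Bool :=
  let s := PySem.Str.strip line
  s == profile_name || (PySem.Str.startswith s "[" && PySem.Str.endswith s "]")

def pvAltGo (profile_name : String) : List String → List String
  | [] => []
  | l :: rest =>
    let keep := PySem.Str.strip l != profile_name
    let body := rest.takeWhile (fun x => !pvIsBoundary profile_name x)
    let rest' := rest.dropWhile (fun x => !pvIsBoundary profile_name x)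
    (if keep then l :: body else []) ++ pvAltGo profile_name rest'
termination_by ls => ls.length
decreasing_by
  exact Nat.lt_succ_of_le (List.length_dropWhile_le _ _)

def remove_profile_from_content_alt (content : String) (profile_name : String) : String :=
  let lines := (PySem.Str.split? content "\n").getD []
  let pre := lines.takeWhile (fun l => !pvIsBoundary profile_name l)
  let rest := lines.dropWhile (fun l => !pvIsBoundary profile_name l)
  let new_lines := pre ++ pvAltGo profile_name rest
  let new_lines := ((new_lines.reverse).dropWhile (fun l => PySem.Str.strip l == "")).reverse
  let updated := PySem.Str.join "\n" new_lines
  if updated != "" && !PySem.Str.endswith updated "\n" then updated ++ "\n" else updated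

-- ===== PRECONDITION & SPEC =====
def Spec_remove_profile_from_content (content : String) (profile_name : String) (out : String) : Prop := out = remove_profile_from_content_alt content profile_name
instance (content : String) (profile_name : String) (out : String) : Decidable (Spec_remove_profile_from_content content profile_name out) := by unfold Spec_remove_profile_from_content; infer_instance

-- ===== CLAIM (what is proved, stated in full; the proofs are below) =====
def Claim_equal_remove_profile_from_content : Prop := ∀ (content : String) (profile_name : String), Dom_remove_profile_from_content content profile_name → Spec_remove_profile_from_content content profile_name (remove_profile_from_content content profile_name)

-- ===== LEMMAS AND PROOFS =====

-- the lines kept by A's loop when started in skip-state s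
def pvOut (p : String) : List String → Bool → List String
  | [], _ => []
  | l :: ls, s =>
    let st := PySem.Str.strip l
    if st == p then pvOut p ls true
    else if PySem.Str.startswith st "[" && PySem.Str.endswith st "]" then l :: pvOut p ls false
    else if s then pvOut p ls s else l :: pvOut p ls s

theorem pvFoldA_eq (p : String) (ls : List String) (acc : List String) (s : Bool) :
    (ls.foldl (pvStepA p) (acc, s)).1 = acc ++ pvOut p ls s := by
  induction ls generalizing acc s with
  | nil => simp [pvOut]
  | cons l ls ih =>
    rw [List.foldl_cons]
    by_cases h1 : (PySem.Str.strip l == p) = true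
    · have hs : pvStepA p (acc, s) l = (acc, true) := by
        unfold pvStepA; simp only [h1, if_true]
      rw [hs, ih]
      simp only [pvOut, h1, if_true]
    · by_cases h2 : (PySem.Str.startswith (PySem.Str.strip l) "[" && PySem.Str.endswith (PySem.Str.strip l) "]") = true
      · have hs : pvStepA p (acc, s) l = (acc ++ [l], false) := by
          unfold pvStepA
          simp only [h1, h2, Bool.false_eq_true, if_false, if_true]
        rw [hs, ih]
        simp only [pvOut, h1, h2, Bool.false_eq_true, if_false, if_true]
        simp
      · have hs : pvStepA p (acc, s) l = (if s then acc else acc ++ [l], s) := by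
          unfold pvStepA
          simp only [h1, h2, Bool.false_eq_true, if_false]
          cases s <;> simp
        rw [hs]
        cases s with
        | true => rw [ih]; simp only [pvOut, h1, h2, Bool.false_eq_true, if_false, if_true]
        | false =>
          simp only [if_false, Bool.false_eq_true]
          rw [ih]
          simp only [pvOut, h1, h2, Bool.false_eq_true, if_false]
          simp

theorem pvOut_eq_alt (p : String) : ∀ n (ls : List String), ls.length ≤ n → ∀ s,
    pvOut p ls s =
      (if s then [] else ls.takeWhile (fun l => !pvIsBoundary p l))
        ++ pvAltGo p (ls.dropWhile (fun l => !pvIsBoundary p l)) := by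
  intro n
  induction n with
  | zero =>
    intro ls h s
    have : ls = [] := List.eq_nil_of_length_eq_zero (Nat.le_zero.mp h)
    subst this; cases s <;> simp [pvOut, pvAltGo]
  | succ n ih =>
    intro ls h s
    cases ls with
    | nil => cases s <;> simp [pvOut, pvAltGo]
    | cons l ls =>
      by_cases hb : pvIsBoundary p l = true
      · -- l is a boundary: takeWhile empty, dropWhile keeps l
        have hdw : (l :: ls).dropWhile (fun l => !pvIsBoundary p l) = l :: ls := by
          simp [List.dropWhile, hb]
        have htw : (l :: ls).takeWhile (fun l => !pvIsBoundary p l) = [] := by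
          simp [List.takeWhile, hb]
        rw [hdw, htw]
        by_cases h1 : PySem.Str.strip l == p
        · -- target section: dropped
          have hkeep : (PySem.Str.strip l != p) = false := by
            simp only [bne]; rw [h1]; rfl
          simp only [pvOut, pvAltGo, h1, if_pos, hkeep]
          rw [ih ls (Nat.le_of_succ_le_succ h) true]
          cases s <;> simp
        · -- other section header: kept
          have h2 : (PySem.Str.startswith (PySem.Str.strip l) "[" && PySem.Str.endswith (PySem.Str.strip l) "]") = true := by
            unfold pvIsBoundary at hb
            simp only [Bool.or_eq_true] at hb
            rcases hb with hb | hb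
            · exact absurd hb h1
            · exact hb
          have hkeep : (PySem.Str.strip l != p) = true := by
            simp only [bne]; simpa using h1
          simp only [pvOut, pvAltGo, h1, h2, hkeep]
          rw [ih ls (Nat.le_of_succ_le_succ h) false]
          cases s <;> simp
      · -- l is not a boundary
        have h1 : (PySem.Str.strip l == p) = false := by
          unfold pvIsBoundary at hb
          simp only [Bool.or_eq_true, not_or] at hb
          simpa using hb.1
        have h2 : (PySem.Str.startswith (PySem.Str.strip l) "[" && PySem.Str.endswith (PySem.Str.strip l) "]") = false := by
          unfold pvIsBoundary at hb
          simp only [Bool.or_eq_true, not_or] at hb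
          simpa using hb.2
        have htw : (l :: ls).takeWhile (fun l => !pvIsBoundary p l) =
            l :: ls.takeWhile (fun l => !pvIsBoundary p l) := by
          simp [List.takeWhile, hb]
        have hdw : (l :: ls).dropWhile (fun l => !pvIsBoundary p l) =
            ls.dropWhile (fun l => !pvIsBoundary p l) := by
          simp [List.dropWhile, hb]
        rw [htw, hdw]
        simp only [pvOut, h1, h2]
        rw [ih ls (Nat.le_of_succ_le_succ h) s]
        cases s <;> simp

-- ===== VERDICT (by name: the statement is the Claim_ definition above) =====
theorem remove_profile_from_content_spec : Claim_equal_remove_profile_from_content := by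
  unfold Claim_equal_remove_profile_from_content
  intro content profile_name _
  unfold Spec_remove_profile_from_content
  unfold remove_profile_from_content remove_profile_from_content_alt
  simp only
  rw [pvFoldA_eq, pvOut_eq_alt profile_name ((PySem.Str.split? content "\n").getD []).length _ le_rfl false]
  simp
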